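-- pv_equiv track=rewrite | github.com/thammegowda/mtdata | mtdata/map.py | trim_stream
-- ===== SOURCE A (Python) =====
-- def trim_stream(stream, skip=0, limit=0):
--     assert skip > 0 or limit > 0
--     i = 0
--     for rec in stream:
--         if skip > 0:
--             if i > 0:  # assumption: i == 0 is a ctrl msg, dont skip it
--                 skip -= 1
--                 continue
--         yield rec
--         i += 1
--         if limit > 0 and i == limit:
--             break
-- ===== SOURCE B (Python) =====
-- def trim_stream(stream, skip=0, limit=0):
--     assert skip > 0 or limit > 0
--     recs = list(stream)
--     if skip > 0:
--         # first record is never skipped; then drop the next `skip` records,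
--         # and the limit counts the first record too
--         kept = recs[:1] + (recs[skip + 1:skip + limit] if limit > 0 else recs[skip + 1:])
--     else:
--         kept = recs[:limit] if limit > 0 else recs
--     yield from kept
-- ===== Notes on version B (the rewrite author's own statement) =====
-- stated objective: simpler
-- what changed: Replaces A's stateful per-record generator loop (mutating skip and a yield counter) with closed-form list slices: keep the first record, drop the next `skip`, cap the rest at limit-1 (or take the first `limit` when skip<=0); Pre_ excludes skip<=0 and limit<=0 together, where A's assert raises AssertionError.
import Mathlib
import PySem

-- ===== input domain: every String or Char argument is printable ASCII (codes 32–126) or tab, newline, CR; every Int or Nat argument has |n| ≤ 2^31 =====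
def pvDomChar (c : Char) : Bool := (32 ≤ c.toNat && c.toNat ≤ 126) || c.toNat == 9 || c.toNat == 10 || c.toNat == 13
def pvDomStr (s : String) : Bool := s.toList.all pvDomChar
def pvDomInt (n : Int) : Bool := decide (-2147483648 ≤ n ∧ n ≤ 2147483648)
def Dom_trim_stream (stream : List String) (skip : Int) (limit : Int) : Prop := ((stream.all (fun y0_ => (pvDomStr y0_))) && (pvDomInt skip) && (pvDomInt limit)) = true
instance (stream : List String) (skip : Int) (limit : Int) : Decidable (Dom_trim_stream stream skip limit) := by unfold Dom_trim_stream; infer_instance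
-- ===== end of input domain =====

-- B replaces A's stateful per-record skip/limit loop with closed-form list slices (objective: simpler).
-- Both are Python generators; equivalence is about the sequence of yielded records (B materialises the stream).

-- ===== PORT A =====
-- the generator loop of A: state = (remaining skip, yield counter i); yields accumulated in order
def trimStreamLoop : List String → Int → Int → Int → List String
  | [], _, _, _ => []
  | rec :: rest, skip, limit, i =>
    if skip > 0 ∧ i > 0 then trimStreamLoop rest (skip - 1) limit i
    else if limit > 0 ∧ i + 1 = limit then [rec]
    else rec :: trimStreamLoop rest skip limit (i + 1)

def trim_stream (stream : List String) (skip : Int) (limit : Int) : List String :=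
  trimStreamLoop stream skip limit 0

-- ===== PORT B =====
def trim_stream_alt (stream : List String) (skip : Int) (limit : Int) : List String :=
  let recs := stream
  if skip > 0 then
    PySem.List.slice recs none (some 1) ++
      (if limit > 0 then PySem.List.slice recs (some (skip + 1)) (some (skip + limit))
       else PySem.List.slice recs (some (skip + 1)) none)
  else
    if limit > 0 then PySem.List.slice recs none (some limit) else recs

-- ===== PRECONDITION & SPEC =====
-- A asserts `skip > 0 or limit > 0` and raises AssertionError otherwise; Pre_ excludes exactly those inputs.
def Pre_trim_stream (_stream : List String) (skip : Int) (limit : Int) : Prop := skip > 0 ∨ limit > 0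
instance (stream : List String) (skip : Int) (limit : Int) : Decidable (Pre_trim_stream stream skip limit) := by unfold Pre_trim_stream; infer_instance
def pvWitness_trim_stream : List String × Int × Int := (["a", "b", "c", "d"], 2, 3)

def Spec_trim_stream (stream : List String) (skip : Int) (limit : Int) (out : List String) : Prop := out = trim_stream_alt stream skip limit
instance (stream : List String) (skip : Int) (limit : Int) (out : List String) : Decidable (Spec_trim_stream stream skip limit out) := by unfold Spec_trim_stream; infer_instance

-- ===== CLAIM (what is proved, stated in full; the proofs are below) =====
def Claim_equal_trim_stream : Prop := ∀ (stream : List String) (skip : Int) (limit : Int), Dom_trim_stream stream skip limit → Pre_trim_stream stream skip limit → Spec_trim_stream stream skip limit (trim_stream stream skip limit)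

-- ===== LEMMAS AND PROOFS =====

-- with neither skipping nor a positive limit the loop yields everything
theorem trimLoop_no_skip_no_limit (l : List String) (skip limit i : Int)
    (hs : skip ≤ 0) (hl : limit ≤ 0) : trimStreamLoop l skip limit i = l := by
  induction l generalizing i with
  | nil => rfl
  | cons rec rest ih =>
      simp only [trimStreamLoop]
      rw [if_neg (by omega), if_neg (by omega)]
      rw [ih]

-- with no skipping left and a live limit, the loop is `take (limit - i)`
theorem trimLoop_no_skip_limit (l : List String) (skip limit i : Int)
    (hs : skip ≤ 0) (hl : 0 < limit) (hi : i < limit) :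
    trimStreamLoop l skip limit i = l.take (limit - i).toNat := by
  induction l generalizing i with
  | nil => simp [trimStreamLoop]
  | cons rec rest ih =>
      simp only [trimStreamLoop]
      rw [if_neg (by omega)]
      by_cases h : i + 1 = limit
      · rw [if_pos ⟨hl, h⟩]
        have : (limit - i).toNat = 1 := by omega
        simp [this]
      · rw [if_neg (by simp [h]), ih (i + 1) (by omega)]
        have h1 : (limit - i).toNat = (limit - (i + 1)).toNat + 1 := by omega
        simp [h1]

-- while i > 0 and skip remains, the loop just drops elements
theorem trimLoop_skip (l : List String) (skip limit i : Int)
    (hs : 0 ≤ skip) (hi : 0 < i) :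
    trimStreamLoop l skip limit i = trimStreamLoop (l.drop skip.toNat) 0 limit i := by
  induction l generalizing skip with
  | nil => simp [trimStreamLoop]
  | cons rec rest ih =>
      by_cases h : skip > 0
      · simp only [trimStreamLoop]
        rw [if_pos ⟨h, hi⟩, ih (skip - 1) (by omega)]
        have h1 : skip.toNat = (skip - 1).toNat + 1 := by omega
        rw [h1, List.drop_succ_cons]
      · have h0 : skip = 0 := by omega
        rw [h0]
        simp only [Int.toNat_zero, List.drop_zero]

-- ===== VERDICT (by name: the statement is the Claim_ definition above) =====
theorem trim_stream_spec : Claim_equal_trim_stream := by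
  intro stream skip limit _hdom hpre
  unfold Spec_trim_stream trim_stream trim_stream_alt
  by_cases hs : skip > 0
  · rw [if_pos hs]
    cases stream with
    | nil => simp [trimStreamLoop, PySem.List.slice]
    | cons rec rest =>
        simp only [trimStreamLoop, zero_add]
        rw [if_neg (by omega)]
        by_cases hl : limit > 0
        · rw [if_pos hl]
          rw [PySem.List.slice_to _ (by omega : (0:Int) ≤ 1),
              PySem.List.slice_toNat _ (by omega : (0:Int) ≤ skip + 1) (by omega : (0:Int) ≤ skip + limit)]
          have hdrop : (skip + 1).toNat = skip.toNat + 1 := by omega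
          have htake : (skip + limit).toNat - (skip + 1).toNat = (limit - 1).toNat := by omega
          by_cases h1 : (1:Int) = limit
          · rw [if_pos ⟨hl, h1⟩]
            have : (limit - 1).toNat = 0 := by omega
            simp [hdrop]
            omega
          · rw [if_neg (by simp [h1])]
            rw [trimLoop_skip rest skip limit 1 (by omega) (by omega),
                trimLoop_no_skip_limit _ 0 limit 1 (by omega) hl (by omega)]
            simp [hdrop]
            omega
        · rw [if_neg hl]
          rw [if_neg (by omega)]
          rw [trimLoop_skip rest skip limit 1 (by omega) (by omega),
              trimLoop_no_skip_no_limit _ 0 limit 1 (by omega) (by omega)]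
          rw [PySem.List.slice_to _ (by omega : (0:Int) ≤ 1),
              PySem.List.slice_from _ (by omega : (0:Int) ≤ skip + 1)]
          have hdrop : (skip + 1).toNat = skip.toNat + 1 := by omega
          simp [hdrop]
  · have hl : limit > 0 := by rcases hpre with h | h; omega; exact h
    rw [if_neg hs, if_pos hl]
    rw [trimLoop_no_skip_limit stream skip limit 0 (by omega) hl (by omega),
        PySem.List.slice_to _ (by omega : (0:Int) ≤ limit)]
    simp
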